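-- pv_equiv track=rewrite | github.com/yeoeol/Algo | 백준/Silver/1411. 비슷한 단어/비슷한 단어.py | check
-- ===== SOURCE A (Python) =====
-- def check(x):
--     cnt = dict()
--     pattern = []
--
--     next_num = 0
--     for ch in x:
--         if ch not in cnt:
--             cnt[ch] = next_num
--             next_num += 1
--         pattern.append(cnt[ch])
--     return pattern
-- ===== SOURCE B (Python) =====
-- def check(x):
--     return [len(set(x[:x.index(ch)])) for ch in x]
-- ===== Notes on version B (the rewrite author's own statement) =====
-- stated objective: alternative
-- what changed: A's single stateful scan that grows a dict of assigned codes and a counter is replaced by a dict-free per-character computation: each character's code is the number of distinct characters in the prefix before its first occurrence (len(set(x[:x.index(ch)]))).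
import Mathlib
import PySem

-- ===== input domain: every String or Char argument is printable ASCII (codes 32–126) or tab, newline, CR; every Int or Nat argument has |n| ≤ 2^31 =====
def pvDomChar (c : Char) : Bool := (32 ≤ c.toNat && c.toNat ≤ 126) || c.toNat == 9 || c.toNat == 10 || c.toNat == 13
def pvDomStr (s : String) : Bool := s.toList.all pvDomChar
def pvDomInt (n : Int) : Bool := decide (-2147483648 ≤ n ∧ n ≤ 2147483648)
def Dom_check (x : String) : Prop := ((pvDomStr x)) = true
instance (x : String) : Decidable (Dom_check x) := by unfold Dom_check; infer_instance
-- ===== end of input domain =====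

-- B drops A's stateful dict-and-counter scan entirely: each character's code is computed
-- independently as the number of distinct characters before its first occurrence (alternative).

-- ===== PORT A =====
-- one step of A's for-loop over (cnt, next_num, pattern); cnt[ch] is ported as getD with
-- default 0, which is exact because pattern.append(cnt[ch]) runs only when ch is a key of cnt
def checkStep (s : PySem.Dict Char Int × Int × List Int) (ch : Char) :
    PySem.Dict Char Int × Int × List Int :=
  let cnt := if s.1.contains ch then s.1 else s.1.insert ch s.2.1
  let next := if s.1.contains ch then s.2.1 else s.2.1 + 1
  (cnt, next, s.2.2 ++ [cnt.getD ch 0])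

def check (x : String) : List Int :=
  (x.toList.foldl checkStep (PySem.Dict.empty, 0, [])).2.2

-- ===== PORT B =====
-- [len(set(x[:x.index(ch)])) for ch in x]; x.index(ch) is ported as index? with getD 0,
-- exact because ch ∈ x inside the comprehension; set(...) is PySem.Set.ofList, len its length
def check_alt (x : String) : List Int :=
  x.toList.map (fun ch =>
    ((PySem.Set.ofList (PySem.List.slice x.toList none
        (some (((PySem.List.index? x.toList ch).getD 0 : Nat) : Int)))).length : Int))

-- ===== PRECONDITION & SPEC =====
def Spec_check (x : String) (out : List Int) : Prop := out = check_alt x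
instance (x : String) (out : List Int) : Decidable (Spec_check x out) := by unfold Spec_check; infer_instance

-- ===== CLAIM (what is proved, stated in full; the proofs are below) =====
def Claim_equal_check : Prop := ∀ (x : String), Dom_check x → Spec_check x (check x)

-- ===== LEMMAS AND PROOFS =====

-- A's dict, as a function of the deduplicated character list
def ordD (D : List Char) : PySem.Dict Char Int :=
  (PySem.List.enumerate D).foldl (fun d p => d.insert p.2 p.1) PySem.Dict.empty

lemma enumerate_snoc {α : Type} (xs : List α) (y : α) (s : Int) :
    PySem.List.enumerate (xs ++ [y]) s
      = PySem.List.enumerate xs s ++ [(s + xs.length, y)] := by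
  induction xs generalizing s with
  | nil => simp [PySem.List.enumerate_nil, PySem.List.enumerate_cons]
  | cons a xs ih =>
      simp [PySem.List.enumerate_cons, ih]
      ring_nf

lemma ordD_snoc (D : List Char) (c : Char) :
    ordD (D ++ [c]) = (ordD D).insert c (D.length : Int) := by
  simp [ordD, enumerate_snoc, List.foldl_append]

lemma contains_ordD (D : List Char) (c : Char) :
    (ordD D).contains c = decide (c ∈ D) := by
  induction D using List.reverseRecOn with
  | nil => simp [ordD, PySem.List.enumerate_nil, PySem.Dict.contains_empty]
  | append_singleton D e ih =>
      simp [ordD_snoc, PySem.Dict.contains_insert, ih]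
      by_cases h : c = e <;> simp [h]

lemma getD_ordD_append_of_not_mem (D E : List Char) (c : Char) (h : c ∉ E) :
    (ordD (D ++ E)).getD c 0 = (ordD D).getD c 0 := by
  induction E using List.reverseRecOn with
  | nil => simp
  | append_singleton E e ih =>
      rw [← List.append_assoc, ordD_snoc]
      rw [PySem.Dict.getD_insert_of_ne _ _ _ (by simp at h; exact h.2)]
      exact ih (by simp at h; exact h.1)

lemma ofList_snoc (p : List Char) (c : Char) :
    PySem.Set.ofList (p ++ [c])
      = if c ∈ p then PySem.Set.ofList p else PySem.Set.ofList p ++ [c] := by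
  rw [PySem.Set.ofList_eq_foldl, List.foldl_append, ← PySem.Set.ofList_eq_foldl]
  simp only [List.foldl, PySem.Set.add, PySem.Set.contains]
  by_cases h : c ∈ PySem.Set.ofList p
  · rw [if_pos (List.contains_iff_mem.mpr h),
        if_pos ((PySem.Set.mem_ofList p c).mp h)]
  · rw [if_neg (by simpa [List.contains_iff_mem] using h),
        if_neg (fun hc => h ((PySem.Set.mem_ofList p c).mpr hc))]

-- dedup of an extension appends new characters on the right
lemma ofList_append_exists (q p : List Char) :
    ∃ E, PySem.Set.ofList (p ++ q) = PySem.Set.ofList p ++ E := by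
  induction q using List.reverseRecOn with
  | nil => exact ⟨[], by simp⟩
  | append_singleton q e ih =>
      obtain ⟨E, hE⟩ := ih
      rw [← List.append_assoc, ofList_snoc]
      by_cases h : e ∈ p ++ q
      · rw [if_pos h]; exact ⟨E, hE⟩
      · rw [if_neg h]; exact ⟨E ++ [e], by rw [hE, List.append_assoc]⟩

-- the table entry of a character already in p is unchanged by any extension of the string
lemma getD_stable (p q : List Char) (c : Char) (hc : c ∈ p) :
    (ordD (PySem.Set.ofList (p ++ q))).getD c 0
      = (ordD (PySem.Set.ofList p)).getD c 0 := by
  obtain ⟨E, hE⟩ := ofList_append_exists q p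
  rw [hE]
  apply getD_ordD_append_of_not_mem
  have hnd : (PySem.Set.ofList p ++ E).Nodup := by
    rw [← hE]; exact PySem.List.nodup_dedup (p ++ q)
  have hcd : c ∈ PySem.Set.ofList p := (PySem.Set.mem_ofList p c).mpr hc
  exact (List.disjoint_of_nodup_append hnd) hcd

lemma mainA (rest p : List Char) (pat : List Int) :
    (rest.foldl checkStep
        (ordD (PySem.Set.ofList p), ((PySem.Set.ofList p).length : Int), pat)).2.2
      = pat ++ rest.map (fun ch => (ordD (PySem.Set.ofList (p ++ rest))).getD ch 0) := by
  induction rest generalizing p pat with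
  | nil => simp
  | cons ch rest ih =>
      rw [List.foldl_cons]
      have hcons : p ++ ch :: rest = (p ++ [ch]) ++ rest := by simp
      by_cases hm : ch ∈ p
      · have hcontains : (ordD (PySem.Set.ofList p)).contains ch = true := by
          rw [contains_ordD]; simp [PySem.Set.mem_ofList, hm]
        have hd : PySem.Set.ofList (p ++ [ch]) = PySem.Set.ofList p := by
          rw [ofList_snoc, if_pos hm]
        have hstep : checkStep (ordD (PySem.Set.ofList p), ((PySem.Set.ofList p).length : Int), pat) ch
            = (ordD (PySem.Set.ofList (p ++ [ch])), ((PySem.Set.ofList (p ++ [ch])).length : Int),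
               pat ++ [(ordD (PySem.Set.ofList (p ++ [ch]))).getD ch 0]) := by
          simp only [checkStep, hcontains, if_true, hd]
        rw [hstep, ih (p ++ [ch]), hcons, List.map_cons]
        rw [getD_stable (p ++ [ch]) rest ch (by simp)]
        simp [List.append_assoc]
      · have hcontains : (ordD (PySem.Set.ofList p)).contains ch = false := by
          rw [contains_ordD]; simp [PySem.Set.mem_ofList, hm]
        have hd : PySem.Set.ofList (p ++ [ch]) = PySem.Set.ofList p ++ [ch] := by
          rw [ofList_snoc, if_neg hm]
        have hstep : checkStep (ordD (PySem.Set.ofList p), ((PySem.Set.ofList p).length : Int), pat) ch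
            = (ordD (PySem.Set.ofList (p ++ [ch])), ((PySem.Set.ofList (p ++ [ch])).length : Int),
               pat ++ [(ordD (PySem.Set.ofList (p ++ [ch]))).getD ch 0]) := by
          simp [checkStep, hcontains, hd, ordD_snoc]
        rw [hstep, ih (p ++ [ch]), hcons, List.map_cons]
        rw [getD_stable (p ++ [ch]) rest ch (by simp)]
        simp [List.append_assoc]

-- B's per-character value equals A's table entry, for characters of the string
lemma pointwise (l : List Char) (ch : Char) (h : ch ∈ l) :
    ((PySem.Set.ofList (PySem.List.slice l none
        (some (((PySem.List.index? l ch).getD 0 : Nat) : Int)))).length : Int)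
      = (ordD (PySem.Set.ofList l)).getD ch 0 := by
  obtain ⟨j, hj⟩ := Option.isSome_iff_exists.mp ((PySem.List.index?_isSome_iff l ch).mpr h)
  obtain ⟨pre, suf, hsplit, hlen, hpre⟩ := (PySem.List.index?_eq_some_iff l ch j).mp hj
  rw [hj]
  simp only [Option.getD_some]
  rw [PySem.List.slice_to_natCast, hsplit, ← hlen, List.take_left]
  have hdec : PySem.Set.ofList (pre ++ [ch]) = PySem.Set.ofList pre ++ [ch] := by
    rw [ofList_snoc, if_neg hpre]
  obtain ⟨E, hE⟩ := ofList_append_exists suf (pre ++ [ch])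
  have hform : PySem.Set.ofList (pre ++ ch :: suf)
      = (PySem.Set.ofList pre ++ [ch]) ++ E := by
    have : pre ++ ch :: suf = (pre ++ [ch]) ++ suf := by simp
    rw [this, hE, hdec]
  have hchE : ch ∉ E := by
    have hnd : ((PySem.Set.ofList pre ++ [ch]) ++ E).Nodup := by
      rw [← hform]; exact PySem.List.nodup_dedup _
    exact (List.disjoint_of_nodup_append hnd) (by simp)
  rw [hform, getD_ordD_append_of_not_mem _ _ _ hchE, ordD_snoc,
      PySem.Dict.getD_insert_self]

-- ===== VERDICT (by name: the statement is the Claim_ definition above) =====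
theorem check_spec : Claim_equal_check := by
  intro x _
  unfold Spec_check check check_alt
  have h := mainA x.toList [] []
  simp only [List.nil_append] at h
  rw [show (PySem.Dict.empty, (0 : Int), ([] : List Int))
        = (ordD (PySem.Set.ofList ([] : List Char)),
           ((PySem.Set.ofList ([] : List Char)).length : Int), ([] : List Int)) from rfl, h]
  exact (List.map_congr_left (fun ch hch => (pointwise x.toList ch hch).symm))
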